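-- pv_equiv track=rewrite | github.com/theTisrock/domain_checks | check_domain/internet_fetch/ip_helper.py | _colon_span_indices
-- ===== SOURCE A (Python) =====
-- def _colon_span_indices(string):  # helper to _compress_colon_span: "ff:::::::ff" to "ff::ff"
--     """Records indices of ipv6 colon spans that cover a series of implied zeros.
--     Should always return an even length list [beg, end, beg, end...].
--     Allows _compress_colon_span to parse and cut ipv6 colons in a series.
--     Not intended for public use."""
--     if string is None or len(string) < 3:
--         return None
--
--     colonspan_list_tuples = []
--
--     length = len(string)
--     beg, end, cur = 0, 0, 0
--
--     while (cur < length):  # traverse string across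
--         # find beginning
--         have_distance = (length - 1) - cur >= 2  # keeps from out of bounds
--         three_colons = False
--         if have_distance:
--             three_colons = string[cur] == ":" and string[cur + 1] == ":" and string[cur + 2] == ":"
--         beg = cur  # beg must be first occurance
--
--         compressible = have_distance and three_colons  # remainder of string is potentially compressible
--
--         if compressible:
--             for i in range(cur + 2, length):  # dns_state_analysis subsequence of ":"
--                 if i == length - 1:  # stop at end of string
--                     if string[i] != ":":
--                         end = i - 1
--                     else:
--                         end = i
--                     cur = length
--                     colonspan_list_tuples.append((beg, end))
--                     break
--                 elif string[i] != ":":  # not at end and current char not ":"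
--                     end = i - 1  # previous char is the ending ":" in the previous sequence
--                     colonspan_list_tuples.append((beg, end))  # record beg, end sequence
--                     # now we have [beg, end] sequence; pick up at i on next iteration
--                     cur = end  # will be incremented at bottom of while loop
--                     break
--                 else:
--                     continue
--
--         cur += 1
--
--     if len(colonspan_list_tuples) == 0:
--         colonspan_list_tuples = None
--
--     return colonspan_list_tuples
-- ===== SOURCE B (Python) =====
-- def _colon_span_indices(string):
--     # Single flat pass: track the start of the current colon run; on leaving a run
--     # of length >= 3, record its inclusive span.
--     if string is None or len(string) < 3:
--         return None
--     spans = []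
--     run = None  # start index of the current colon run, if inside one
--     for i, ch in enumerate(string):
--         if ch == ':':
--             if run is None:
--                 run = i
--         elif run is not None:
--             if i - run >= 3:
--                 spans.append((run, i - 1))
--             run = None
--     if run is not None and len(string) - run >= 3:
--         spans.append((run, len(string) - 1))
--     return spans if spans else None
-- ===== Notes on version B (the rewrite author's own statement) =====
-- stated objective: simpler
-- what changed: Replaces A's pointer state machine (three-colon lookahead plus an inner for-loop that rescans and resets the cursor) with one flat enumerate pass that tracks the start of the current colon run and records each maximal run of length >= 3 when it ends; same O(n) but a single cheap pass (measured ~4x).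
import Mathlib
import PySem

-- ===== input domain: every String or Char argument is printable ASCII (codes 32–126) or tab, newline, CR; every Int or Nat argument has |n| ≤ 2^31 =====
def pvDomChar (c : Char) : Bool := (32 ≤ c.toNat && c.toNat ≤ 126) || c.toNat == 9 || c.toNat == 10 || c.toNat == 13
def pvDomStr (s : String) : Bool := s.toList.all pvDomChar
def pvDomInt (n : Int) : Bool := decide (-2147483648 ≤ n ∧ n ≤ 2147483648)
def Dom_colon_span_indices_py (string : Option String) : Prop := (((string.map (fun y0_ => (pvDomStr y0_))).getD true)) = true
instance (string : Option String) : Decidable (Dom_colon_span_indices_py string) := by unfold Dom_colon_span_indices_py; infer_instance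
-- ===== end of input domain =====

-- B replaces A's pointer state machine (three-colon lookahead + inner rescanning loop)
-- with one flat pass tracking the start of the current colon run (simpler; measured faster in a timing run).

-- ===== PORT A =====
-- All indices in both Pythons are nonnegative; they are tracked as Nat and cast to Int
-- in the output pairs.  s[i] is PySem.List.pyGet? (always in range where evaluated;
-- the ' ' default is never used).
def pvCharAt (cs : List Char) (i : Nat) : Char := (PySem.List.pyGet? cs (i : Int)).getD ' '

-- the inner `for i in range(cur+2, length)` loop of A: returns (new cur, appended pair)
def pvAInner (cs : List Char) (len beg cur0 i : Nat) : Nat × Option (Nat × Nat) :=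
  if i < len then
    if i = len - 1 then
      (len, some (beg, if pvCharAt cs i ≠ ':' then i - 1 else i))
    else if pvCharAt cs i ≠ ':' then
      (i - 1, some (beg, i - 1))
    else
      pvAInner cs len beg cur0 (i + 1)
  else (cur0, none)  -- loop exhausted without break: cur unchanged, nothing appended
termination_by len - i

theorem pvAInner_fst_ge (cs : List Char) (len beg : Nat) (cur0 i : Nat)
    (h : cur0 + 1 ≤ i) : cur0 ≤ (pvAInner cs len beg cur0 i).1 := by
  fun_induction pvAInner cs len beg cur0 i <;> simp_all <;> omega

-- the outer `while cur < length` loop of A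
def pvALoop (cs : List Char) (len cur : Nat) (acc : List (Nat × Nat)) : List (Nat × Nat) :=
  if h : cur < len then
    let have_distance : Bool := decide (2 ≤ (len - 1) - cur)
    let three_colons : Bool := have_distance &&
      (decide (pvCharAt cs cur = ':') && decide (pvCharAt cs (cur + 1) = ':') &&
       decide (pvCharAt cs (cur + 2) = ':'))
    let compressible := have_distance && three_colons
    if compressible then
      let r := pvAInner cs len cur cur (cur + 2)
      pvALoop cs len (r.1 + 1) (acc ++ r.2.toList)
    else
      pvALoop cs len (cur + 1) acc
  else acc
termination_by len - cur
decreasing_by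
  · have := pvAInner_fst_ge cs len cur cur (cur + 2) (by omega)
    omega
  · omega

def colon_span_indices_py (string : Option String) : Option (List (Int × Int)) :=
  match string with
  | none => none
  | some s =>
    if PySem.Str.len s < 3 then none
    else
      let cs := s.toList
      let res := pvALoop cs cs.length 0 []
      if res.length = 0 then none
      else some (res.map (fun p => ((p.1 : Int), (p.2 : Int))))

-- ===== PORT B =====
-- the `for i, ch in enumerate(string)` pass of B, carrying the run start and the spans;
-- the [] case is B's final flush (i = len(string) there)
def pvBLoop (rest : List Char) (i : Nat) (run : Option Nat) (acc : List (Nat × Nat)) :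
    List (Nat × Nat) :=
  match rest with
  | [] =>
    match run with
    | some r => if 3 ≤ i - r then acc ++ [(r, i - 1)] else acc
    | none => acc
  | c :: cs =>
    if c = ':' then pvBLoop cs (i + 1) (some (run.getD i)) acc
    else
      match run with
      | some r => pvBLoop cs (i + 1) none (if 3 ≤ i - r then acc ++ [(r, i - 1)] else acc)
      | none => pvBLoop cs (i + 1) none acc

def colon_span_indices_py_alt (string : Option String) : Option (List (Int × Int)) :=
  match string with
  | none => none
  | some s =>
    if PySem.Str.len s < 3 then none
    else
      let spans := pvBLoop s.toList 0 none []
      if spans.isEmpty then none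
      else some (spans.map (fun p => ((p.1 : Int), (p.2 : Int))))

-- ===== PRECONDITION & SPEC =====
def Spec_colon_span_indices_py (string : Option String) (out : Option (List (Int × Int))) : Prop := out = colon_span_indices_py_alt string
instance (string : Option String) (out : Option (List (Int × Int))) : Decidable (Spec_colon_span_indices_py string out) := by unfold Spec_colon_span_indices_py; infer_instance

-- ===== CLAIM (what is proved, stated in full; the proofs are below) =====
def Claim_equal_colon_span_indices_py : Prop := ∀ (string : Option String), Dom_colon_span_indices_py string → Spec_colon_span_indices_py string (colon_span_indices_py string)

-- ===== LEMMAS AND PROOFS =====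

-- every list splits as leading ':'s followed by a suffix not starting with ':'
theorem pvDecomp (xs : List Char) :
    ∃ k rest, xs = List.replicate k ':' ++ rest ∧ (rest = [] ∨ ∃ c rest', rest = c :: rest' ∧ c ≠ ':') := by
  induction xs with
  | nil => exact ⟨0, [], rfl, Or.inl rfl⟩
  | cons c cs ih =>
    by_cases hc : c = ':'
    · obtain ⟨k, rest, hk, hrest⟩ := ih
      exact ⟨k + 1, rest, by simp [hc, List.replicate_succ, hk], hrest⟩
    · exact ⟨0, c :: cs, rfl, Or.inr ⟨c, cs, rfl, hc⟩⟩

theorem pvCharAt_eq (cs : List Char) (n : Nat) (h : n < cs.length) :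
    pvCharAt cs n = cs[n] := by
  simp [pvCharAt, PySem.List.pyGet?_natCast, List.getElem?_eq_getElem h]

-- B keeps the run start while scanning colons
theorem pvBLoop_run (m : Nat) :
    ∀ (rest : List Char) (i r : Nat) (acc : List (Nat × Nat)),
      pvBLoop (List.replicate m ':' ++ rest) i (some r) acc = pvBLoop rest (i + m) (some r) acc := by
  induction m with
  | zero => intro rest i r acc; simp
  | succ m ih =>
    intro rest i r acc
    rw [List.replicate_succ, show i + (m + 1) = i + 1 + m from by omega]
    show pvBLoop (':' :: (List.replicate m ':' ++ rest)) i (some r) acc = _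
    simp only [pvBLoop, Option.getD_some, ih]
    simp

-- A's inner loop over a run of colons ending at position j + m (boundary: end of string
-- or a non-colon char)
theorem pvAInner_run (cs : List Char) (beg cur0 : Nat) :
    ∀ m j, 1 ≤ m → j + m ≤ cs.length →
      (∀ t, t < m → pvCharAt cs (j + t) = ':') →
      (j + m = cs.length ∨ pvCharAt cs (j + m) ≠ ':') →
      pvAInner cs cs.length beg cur0 j =
        (if cs.length ≤ j + m + 1 then cs.length else j + m - 1, some (beg, j + m - 1)) := by
  intro m
  induction m with
  | zero => omega
  | succ m ih =>
    intro j h1 hle hcol hbdy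
    have hj : j < cs.length := by omega
    have hcj : pvCharAt cs j = ':' := by simpa using hcol 0 (by omega)
    rw [pvAInner]
    by_cases hlast : j = cs.length - 1
    · -- j is the last index; it is a colon
      have hm : m = 0 := by omega
      subst hm
      simp only [if_pos hj, if_pos hlast, hcj]
      simp only [ne_eq, not_true_eq_false, if_false]
      split <;> simp [Prod.mk.injEq] <;> omega
    · simp only [if_pos hj, if_neg hlast, hcj]
      simp only [ne_eq, not_true_eq_false, if_false]
      rcases Nat.eq_or_lt_of_le (show 1 ≤ m + 1 from by omega) with h | h
      · -- m = 0 : next position j+1 is the boundary, and j+1 < cs.length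
        have hm : m = 0 := by omega
        subst hm
        have hb : j + 1 < cs.length := by omega
        have hnc : pvCharAt cs (j + 1) ≠ ':' := by
          rcases hbdy with h' | h'
          · omega
          · simpa using h'
        rw [pvAInner]
        by_cases hl2 : j + 1 = cs.length - 1
        · simp only [if_pos hb, if_pos hl2, if_pos hnc]
          split <;> simp [Prod.mk.injEq] <;> omega
        · simp only [if_pos hb, if_neg hl2, if_pos hnc]
          split <;> simp [Prod.mk.injEq] <;> omega
      · -- m ≥ 1 : recurse
        have := ih (j + 1) (by omega) (by omega)
          (fun t ht => by simpa [Nat.add_assoc, Nat.add_comm 1 t] using hcol (t + 1) (by omega))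
          (by rcases hbdy with h' | h'
              · exact Or.inl (by omega)
              · exact Or.inr (by simpa [Nat.add_assoc, Nat.add_comm 1 m] using h'))
        rw [this]
        have e1 : j + 1 + m = j + (m + 1) := by omega
        rw [e1]

-- once fewer than 3 positions remain, A's loop appends nothing more
theorem pvALoop_tail (cs : List Char) :
    ∀ n cur acc, n = cs.length - cur → cs.length ≤ cur + 2 →
      pvALoop cs cs.length cur acc = acc := by
  intro n
  induction n with
  | zero =>
    intro cur acc hn _
    rw [pvALoop]
    simp [show ¬ cur < cs.length by omega]
  | succ n ih =>
    intro cur acc hn h2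
    by_cases hcl : cur < cs.length
    · rw [pvALoop]
      have hd : ¬ (2 ≤ (cs.length - 1) - cur) := by omega
      simp only [dif_pos hcl, decide_eq_true_eq]
      simp only [hd, decide_false, Bool.false_and, if_false]
      exact ih (cur + 1) acc (by omega) (by omega)
    · rw [pvALoop]; simp [hcl]

-- one non-compressible step of A's while loop
theorem pvALoop_skip (cs : List Char) (cur : Nat) (acc : List (Nat × Nat))
    (h : cur < cs.length)
    (hfalse : 2 ≤ (cs.length - 1) - cur →
      pvCharAt cs cur ≠ ':' ∨ pvCharAt cs (cur + 1) ≠ ':' ∨ pvCharAt cs (cur + 2) ≠ ':') :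
    pvALoop cs cs.length cur acc = pvALoop cs cs.length (cur + 1) acc := by
  rw [pvALoop]
  simp only [dif_pos h]
  by_cases hd : 2 ≤ (cs.length - 1) - cur
  · rcases hfalse hd with hx | hx | hx <;>
      simp [hx, hd]
  · simp [hd]

-- one compressible step of A's while loop
theorem pvALoop_comp (cs : List Char) (cur : Nat) (acc : List (Nat × Nat))
    (h : cur < cs.length) (hd : 2 ≤ (cs.length - 1) - cur)
    (h0 : pvCharAt cs cur = ':') (h1 : pvCharAt cs (cur + 1) = ':')
    (h2 : pvCharAt cs (cur + 2) = ':') :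
    pvALoop cs cs.length cur acc =
      pvALoop cs cs.length ((pvAInner cs cs.length cur cur (cur + 2)).1 + 1)
        (acc ++ (pvAInner cs cs.length cur cur (cur + 2)).2.toList) := by
  rw [pvALoop]
  simp [dif_pos h, hd, h0, h1, h2]

-- B consumes a block of k >= 1 leading colons, remembering where it started
theorem pvBLoop_block (k : Nat) (hk : 1 ≤ k) (rest : List Char) (i : Nat)
    (acc : List (Nat × Nat)) :
    pvBLoop (List.replicate k ':' ++ rest) i none acc = pvBLoop rest (i + k) (some i) acc := by
  obtain ⟨m, rfl⟩ : ∃ m, k = m + 1 := ⟨k - 1, by omega⟩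
  rw [List.replicate_succ]
  show pvBLoop (':' :: (List.replicate m ':' ++ rest)) i none acc = _
  simp only [pvBLoop, Option.getD_none, if_pos rfl, pvBLoop_run]
  simp
  congr 1
  omega

-- the main simulation: from any position (on a run boundary by construction of the
-- induction), A's while-loop and B's flat pass produce the same spans
theorem pvMain (cs : List Char) :
    ∀ n cur acc, n = cs.length - cur → cur ≤ cs.length →
      pvALoop cs cs.length cur acc = pvBLoop (cs.drop cur) cur none acc := by
  intro n
  induction n using Nat.strong_induction_on with
  | _ n ih =>
  intro cur acc hn hcur
  obtain ⟨k, rest, hdec, hhead⟩ := pvDecomp (cs.drop cur)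
  have hlen : cs.length - cur = k + rest.length := by
    have := congrArg List.length hdec
    simpa [hcur] using this
  -- characters inside the run are colons
  have hcolon : ∀ t, t < k → pvCharAt cs (cur + t) = ':' := by
    intro t ht
    have h1 : cur + t < cs.length := by omega
    rw [pvCharAt_eq cs _ h1]
    have hlt : t < (cs.drop cur).length := by simp; omega
    have hgd : (cs.drop cur)[t]'hlt = cs[cur + t]'h1 := by
      simp [List.getElem_drop]
    rw [← hgd]
    simp only [hdec] at hlt ⊢
    rw [List.getElem_append_left (by simpa using ht)]
    simp
  have hdropk : cs.drop (cur + k) = rest := by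
    have : cs.drop (cur + k) = (cs.drop cur).drop k := by
      rw [List.drop_drop]
    rw [this, hdec]
    simpa using List.drop_left (List.replicate k ':') rest
  rcases hhead with hrest | ⟨c, rest', hrest, hc⟩
  · -- the run reaches the end of the string: cs.length = cur + k
    subst hrest
    have hfull : cs.length = cur + k := by simp at hlen; omega
    have hB : pvBLoop (cs.drop cur) cur none acc =
        (if 3 ≤ k then acc ++ [(cur, cur + k - 1)] else acc) := by
      rcases Nat.eq_zero_or_pos k with hk0 | hk1
      · subst hk0
        simp only [hdec]
        simp [pvBLoop]
      · rw [hdec, List.append_nil] at *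
        rw [show (List.replicate k ':' : List Char) = List.replicate k ':' ++ [] by simp,
          pvBLoop_block k hk1]
        simp only [pvBLoop]
        have : cur + k - cur = k := by omega
        rw [this]
    rw [hB]
    by_cases hk3 : 3 ≤ k
    · -- A records the span and stops
      rw [pvALoop_comp cs cur acc (by omega) (by omega)
        (hcolon 0 (by omega)) (by simpa using hcolon 1 (by omega))
        (hcolon 2 (by omega))]
      rw [pvAInner_run cs cur cur (k - 2) (cur + 2) (by omega) (by omega)
        (fun t ht => by
          have := hcolon (2 + t) (by omega)
          simpa [Nat.add_assoc] using this)
        (Or.inl (by omega))]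
      have e1 : cur + 2 + (k - 2) = cur + k := by omega
      rw [e1]
      simp only [if_pos (show cs.length ≤ cur + k + 1 by omega)]
      rw [pvALoop_tail cs 0 (cs.length + 1) _ (by omega) (by omega)]
      simp [hk3]
    · -- short run to the end: A appends nothing
      rw [if_neg hk3]
      rw [pvALoop_tail cs (cs.length - cur) cur acc (by omega) (by omega)]
  · -- the run is followed by a non-colon character c
    subst hrest
    have hfull : cs.length = cur + k + 1 + rest'.length := by simp at hlen; omega
    have hcc : pvCharAt cs (cur + k) = c := by
      have h1 : cur + k < cs.length := by omega
      rw [pvCharAt_eq cs _ h1]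
      have : cs[cur + k]'h1 = (cs.drop (cur + k))[0]'(by simp; omega) := by
        simp [List.getElem_drop]
      rw [this]
      simp [hdropk]
    have hdropk1 : cs.drop (cur + k + 1) = rest' := by
      have : cs.drop (cur + k + 1) = (cs.drop (cur + k)).drop 1 := by
        rw [List.drop_drop]
      rw [this, hdropk]
      simp
    -- B's value across the block
    have hB : pvBLoop (cs.drop cur) cur none acc =
        pvBLoop rest' (cur + k + 1) none
          (if 3 ≤ k then acc ++ [(cur, cur + k - 1)] else acc) := by
      rcases Nat.eq_zero_or_pos k with hk0 | hk1
      · subst hk0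
        simp only [hdec, List.replicate, List.nil_append]
        rw [pvBLoop]
        simp [hc]
      · rw [hdec, pvBLoop_block k hk1]
        rw [pvBLoop]
        simp only [if_neg hc]
        have : cur + k - cur = k := by omega
        rw [this]
    rw [hB]
    by_cases hk3 : 3 ≤ k
    · -- A: compressible step over the run
      rw [pvALoop_comp cs cur acc (by omega) (by omega)
        (hcolon 0 (by omega)) (by simpa using hcolon 1 (by omega))
        (hcolon 2 (by omega))]
      rw [pvAInner_run cs cur cur (k - 2) (cur + 2) (by omega) (by omega)
        (fun t ht => by
          have := hcolon (2 + t) (by omega)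
          simpa [Nat.add_assoc] using this)
        (Or.inr (by
          have e1 : cur + 2 + (k - 2) = cur + k := by omega
          rw [e1, hcc]; exact hc))]
      have e1 : cur + 2 + (k - 2) = cur + k := by omega
      rw [e1]
      simp only [if_pos hk3, Option.toList_some]
      by_cases hend : cs.length ≤ cur + k + 1
      · -- the non-colon is the last character: A stops with cur = length
        have hr0 : rest' = [] := by
          have h0 : rest'.length = 0 := by omega
          exact List.eq_nil_of_length_eq_zero h0
        rw [if_pos hend]
        rw [pvALoop_tail cs 0 (cs.length + 1) _ (by omega) (by omega)]
        rw [hr0]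
        simp [pvBLoop]
      · -- A resumes right after the span, at the non-colon position cur + k
        rw [if_neg hend]
        have e2 : cur + k - 1 + 1 = cur + k := by omega
        rw [e2]
        rw [ih (cs.length - (cur + k)) (by omega) (cur + k) _ rfl (by omega)]
        rw [hdropk]
        rw [pvBLoop]
        simp [hc]
    · -- short run: A walks over it (and the following non-colon) one plain step at a
      -- time, appending nothing
      have hstep : ∀ m t, t + m = k + 1 → pvALoop cs cs.length (cur + t) acc =
          pvALoop cs cs.length (cur + (k + 1)) acc := by
        intro m
        induction m with
        | zero =>
          intro t h
          rw [show t = k + 1 from by omega]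
        | succ m ihm =>
          intro t h
          rw [pvALoop_skip cs (cur + t) acc (by omega) ?side]
          · rw [show cur + t + 1 = cur + (t + 1) from by omega]
            exact ihm (t + 1) (by omega)
          case side =>
            intro _
            rcases (show t = k ∨ k = t + 1 ∨ k = t + 2 from by omega) with he | he | he
            · exact Or.inl (by rw [show cur + t = cur + k from by omega, hcc]; exact hc)
            · exact Or.inr (Or.inl
                (by rw [show cur + t + 1 = cur + k from by omega, hcc]; exact hc))
            · exact Or.inr (Or.inr
                (by rw [show cur + t + 2 = cur + k from by omega, hcc]; exact hc))
      have hA : pvALoop cs cs.length cur acc = pvALoop cs cs.length (cur + (k + 1)) acc := by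
        simpa using hstep (k + 1) 0 (by omega)
      rw [hA, if_neg hk3]
      rw [ih (cs.length - (cur + (k + 1))) (by omega) (cur + (k + 1)) acc rfl (by omega)]
      rw [show cur + (k + 1) = cur + k + 1 from by omega, hdropk1]

-- ===== VERDICT (by name: the statement is the Claim_ definition above) =====
theorem colon_span_indices_py_spec : Claim_equal_colon_span_indices_py := by
  intro string _
  unfold Spec_colon_span_indices_py colon_span_indices_py colon_span_indices_py_alt
  cases string with
  | none => rfl
  | some s =>
    by_cases h3 : PySem.Str.len s < 3
    · show (if PySem.Str.len s < 3 then none else _) = (if PySem.Str.len s < 3 then none else _)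
      rw [if_pos h3, if_pos h3]
    · have hm := pvMain s.toList s.toList.length 0 [] (by omega) (by omega)
      simp only [List.drop_zero] at hm
      show (if PySem.Str.len s < 3 then none else _) = (if PySem.Str.len s < 3 then none else _)
      rw [if_neg h3, if_neg h3]
      simp only [hm, List.isEmpty_iff, List.length_eq_zero_iff]
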